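-- pv_equiv track=rewrite | github.com/aashrafh/ProblemSolving | CF-B/716B_Complete_the_Word.py | f
-- ===== SOURCE A (Python) =====
-- from string import ascii_uppercase as C
--
-- def f(s):
--     for i in range(len(s)):
--         t=s[i:i+26]
--         X=set(t)|{'?'}
--         if len(X)+t.count('?')==27:
--             x=list(set(C)-X)
--             for j in range(26):
--                 if s[i+j]=='?':
--                     s[i+j]=x.pop()
--             return ''.join(s).replace('?', 'A')
--     return '-1'
-- ===== SOURCE B (Python) =====
-- from string import ascii_uppercase as C
--
-- def f(s):
--     prev = {}
--     left = 0
--     for j, c in enumerate(s):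
--         if c != '?':
--             p = prev.get(c, -1)
--             if p >= left:
--                 left = p + 1
--             prev[c] = j
--         if j - left >= 25:
--             i = j - 25
--             w = s[i:j + 1]
--             missing = [u for u in C if u not in w]
--             out = list(s)
--             for k in range(i, j + 1):
--                 if out[k] == '?':
--                     out[k] = missing.pop()
--             return ''.join(out).replace('?', 'A')
--     return '-1'
-- ===== Notes on version B (the rewrite author's own statement) =====
-- stated objective: faster
-- what changed: Replaces A's per-start rebuild of a set over every length-26 slice with a single left-to-right two-pointer scan keeping a last-occurrence dict and the leftmost duplicate-free window start; the first valid window is filled from the missing letters in alphabetical order instead of Python's hash-seed-dependent set order (Pre_ excludes the inputs where that order shows).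
import Mathlib
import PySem

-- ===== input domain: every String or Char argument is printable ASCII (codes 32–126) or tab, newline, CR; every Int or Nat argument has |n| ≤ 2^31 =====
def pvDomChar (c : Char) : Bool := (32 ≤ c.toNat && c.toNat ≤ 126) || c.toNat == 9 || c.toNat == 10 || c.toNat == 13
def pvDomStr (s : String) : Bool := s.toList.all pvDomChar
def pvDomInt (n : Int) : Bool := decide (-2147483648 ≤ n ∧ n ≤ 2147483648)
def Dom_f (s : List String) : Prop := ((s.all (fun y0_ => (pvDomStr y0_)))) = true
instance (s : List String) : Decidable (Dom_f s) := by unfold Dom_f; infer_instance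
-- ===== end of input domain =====

-- B replaces A's per-start set rebuild with one two-pointer scan (last-occurrence dict + leftmost
-- duplicate-free start) and fills from the alphabetically ordered missing letters: faster by a
-- constant factor. A mutates its argument list in place, B does not; the claim is about the
-- return value only.

-- string.ascii_uppercase, as the list of its characters (both programs import it as C)
def pyUppercase : List String :=
  ["A","B","C","D","E","F","G","H","I","J","K","L","M","N","O","P","Q","R","S","T","U","V","W","X","Y","Z"]

-- ===== PORT A =====
-- inner loop 'for j in range(26): if s[i+j]=="?": s[i+j]=x.pop()' (j is the absolute index i+j;
-- fuel is the remaining iteration count). x.pop() on an empty x would be an IndexError in Python,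
-- but it is unreachable: the window condition guarantees x holds at least as many letters as
-- there are '?' slots; the fallthrough arm keeps the port total.
def fFillA (j : Nat) (fuel : Nat) (s x : List String) : List String :=
  match fuel with
  | 0 => s
  | fuel' + 1 =>
    if PySem.List.pyGetD s (j : Int) "" == "?" then
      match PySem.List.pop? x (-1) with
      | some (v, x') => fFillA (j+1) fuel' (PySem.List.pySetD s (j : Int) v) x'
      | none => fFillA (j+1) fuel' s x
    else fFillA (j+1) fuel' s x

-- 'for i in range(len(s)): …' — fuel counts the remaining values of i. Python's
-- list(set(C)-X) enumerates the difference in hash order; the port takes it in C's order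
-- (PySem.Set.diff keeps the left order). Pre_f restricts to the inputs on which at most a
-- forced single element of it is ever used, where that order is immaterial.
def fLoopA (s : List String) (i fuel : Nat) : String :=
  match fuel with
  | 0 => "-1"
  | fuel' + 1 =>
    let t := PySem.List.slice s (some (i : Int)) (some ((i : Int) + 26))
    let X := PySem.Set.add (PySem.Set.ofList t) "?"
    if X.length + PySem.List.count t "?" == 27 then
      let x := PySem.Set.diff (PySem.Set.ofList pyUppercase) X
      PySem.Str.replace (PySem.Str.join "" (fFillA i 26 s x)) "?" "A"
    else fLoopA s (i+1) fuel'

def f (s : List String) : String := fLoopA s 0 s.length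

-- ===== PORT B =====
-- inner loop 'for k in range(i, j+1): if out[k]=="?": out[k]=missing.pop()' of Source B (same
-- total-form note as fFillA: missing can never run dry on a valid window).
def fFillB (k : Nat) (fuel : Nat) (out missing : List String) : List String :=
  match fuel with
  | 0 => out
  | fuel' + 1 =>
    if PySem.List.pyGetD out (k : Int) "" == "?" then
      match PySem.List.pop? missing (-1) with
      | some (v, missing') => fFillB (k+1) fuel' (PySem.List.pySetD out (k : Int) v) missing'
      | none => fFillB (k+1) fuel' out missing
    else fFillB (k+1) fuel' out missing

-- 'for j, c in enumerate(s): …' — structural recursion on the remaining suffix, j the index.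
def fLoopB (s : List String) (rest : List String) (prev : PySem.Dict String Int) (left : Int) (j : Int) : String :=
  match rest with
  | [] => "-1"
  | c :: rest' =>
    let pl :=
      if c != "?" then
        let p := (PySem.Dict.get? prev c).getD (-1)
        (PySem.Dict.insert prev c j, if p ≥ left then p + 1 else left)
      else (prev, left)
    if j - pl.2 ≥ 25 then
      let i := j - 25
      let w := PySem.List.slice s (some i) (some (j + 1))
      let missing := pyUppercase.filter (fun u => !(w.contains u))
      PySem.Str.replace (PySem.Str.join "" (fFillB i.toNat 26 s missing)) "?" "A"
    else fLoopB s rest' pl.1 pl.2 (j + 1)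

def f_alt (s : List String) : String := fLoopB s s PySem.Dict.empty 0 0

-- ===== PRECONDITION & SPEC =====
-- the window s[i:i+26] (input inspection only)
def pvWin (s : List String) (i : Nat) : List String := (s.drop i).take 26

-- A returns at the first start i whose window has 26 entries with no repeated non-'?' entry
def pvValid (s : List String) (i : Nat) : Bool :=
  decide (i + 26 ≤ s.length) && decide (((pvWin s i).filter (fun c => !(c == "?"))).Nodup)

-- Pre_f excludes inputs whose first valid window contains a '?' while more than one uppercase
-- letter is absent from it: there A's result depends on the hash-seed iteration order of
-- list(set(C)-X), so there is no single value to match (see claim.json "cites").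
def Pre_f (s : List String) : Prop :=
  ∀ i < s.length, pvValid s i = true → (∀ k < i, pvValid s k = false) →
    ((pvWin s i).count "?" = 0 ∨
      (pyUppercase.filter (fun u => !((pvWin s i).contains u))).length ≤ 1)

instance (s : List String) : Decidable (Pre_f s) := by unfold Pre_f; infer_instance

def pvWitness_f : List String :=
  ["A","B","C","D","E","F","G","H","I","J","K","L","M","N","O","P","Q","R","S","T","?","V","W","X","Y","Z"]

def Spec_f (s : List String) (out : String) : Prop := out = f_alt s
instance (s : List String) (out : String) : Decidable (Spec_f s out) := by unfold Spec_f; infer_instance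

-- ===== CLAIM (what is proved, stated in full; the proofs are below) =====
def Claim_equal_f : Prop := ∀ (s : List String), Dom_f s → Pre_f s → Spec_f s (f s)

-- ===== LEMMAS AND PROOFS =====

-- ---------- proof-only definitions ----------

-- the common output at a valid start i, in A's shape (fFillA) and B's shape (fFillB)
def pvMissing (s : List String) (i : Nat) : List String :=
  pyUppercase.filter (fun u => !((pvWin s i).contains u))

def pvOutA (s : List String) (i : Nat) : String :=
  PySem.Str.replace (PySem.Str.join "" (fFillA i 26 s (pvMissing s i))) "?" "A"

def pvOutB (s : List String) (i : Nat) : String :=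
  PySem.Str.replace (PySem.Str.join "" (fFillB i 26 s (pvMissing s i))) "?" "A"

-- index form of "the window [l, j) has no repeated non-'?' entry"
def noDupIdx (s : List String) (l j : Nat) : Prop :=
  ∀ k1 k2, l ≤ k1 → k1 < k2 → k2 < j → s.getD k1 "" ≠ "?" → s.getD k1 "" ≠ s.getD k2 ""

-- prev maps each non-'?' value to its last occurrence before j (none = no occurrence)
def InvPrev (s : List String) (j : Nat) (prev : PySem.Dict String Int) : Prop :=
  ∀ c : String, c ≠ "?" →
    ((PySem.Dict.get? prev c = none ∧ ∀ k, k < j → s.getD k "" ≠ c) ∨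
     (∃ p : Nat, PySem.Dict.get? prev c = some (p : Int) ∧ p < j ∧ s.getD p "" = c ∧
        ∀ k, p < k → k < j → s.getD k "" ≠ c))

-- left is the least duplicate-free window start ending at j
def InvLeft (s : List String) (j : Nat) (left : Int) : Prop :=
  0 ≤ left ∧ left ≤ (j : Int) ∧ ∀ l : Nat, l ≤ j → (noDupIdx s l j ↔ left ≤ (l : Int))

-- ---------- shared small facts ----------

theorem pvSlice_eq_win (s : List String) (i : Nat) :
    PySem.List.slice s (some (i : Int)) (some ((i : Int) + 26)) = pvWin s i := by
  have h := PySem.List.slice_natCast_add (xs := s) (j := i) (n := 26)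
  simpa [pvWin] using h

theorem pvWin_length (s : List String) (i : Nat) :
    (pvWin s i).length = min 26 (s.length - i) := by
  simp [pvWin, Nat.min_comm]

theorem pvWin_getElem (s : List String) (i k : Nat) (h : k < (pvWin s i).length) :
    (pvWin s i)[k] = s.getD (i + k) "" := by
  have h1 : k < 26 := lt_of_lt_of_le h (by simp [pvWin_length s i])
  have h2 : i + k < s.length := by
    have := pvWin_length s i
    omega
  simp [pvWin, List.getD_eq_getElem?_getD, List.getElem?_eq_getElem h2]


theorem pvNodup_iff_card (l : List String) : l.Nodup ↔ l.toFinset.card = l.length := by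
  constructor
  · exact fun h => List.toFinset_card_of_nodup h
  · intro h
    have hd : l.dedup.length = l.length := by rw [← List.card_toFinset]; exact h
    have heq : l.dedup = l := (List.dedup_sublist l).eq_of_length hd
    rw [← heq]; exact l.nodup_dedup

-- A's counting condition is exactly pvValid
theorem condA_iff (s : List String) (i : Nat) :
    ((PySem.Set.add (PySem.Set.ofList (pvWin s i)) "?").length
      + PySem.List.count (pvWin s i) "?" = 27) ↔ pvValid s i = true := by
  have hq : PySem.List.count (pvWin s i) "?" = (pvWin s i).count "?" := by
    simp [PySem.List.count_eq]
  set t := pvWin s i with ht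
  set nonq := t.filter (fun c => !(c == "?")) with hnq
  have hS : (PySem.Set.add (PySem.Set.ofList t) "?").length = nonq.toFinset.card + 1 := by
    have hnd : (PySem.Set.add (PySem.Set.ofList t) "?").Nodup :=
      PySem.Set.nodup_add (PySem.Set.ofList t) "?" (PySem.Set.nodup_ofList t)
    have hfin : (PySem.Set.add (PySem.Set.ofList t) "?").toFinset
        = insert "?" nonq.toFinset := by
      ext x
      by_cases hx : x = "?" <;>
        simp [PySem.Set.mem_add, PySem.Set.mem_ofList, hx, hnq]
    have := List.toFinset_card_of_nodup hnd
    rw [← this, hfin, Finset.card_insert_of_notMem]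
    simp [hnq]
  have hsplit : nonq.length + t.count "?" = t.length := by
    have h1 : t.count "?" = (t.filter (fun c => (c == "?"))).length := by
      simp [List.count_eq_length_filter]
    have h2 := List.length_eq_length_filter_add (l := t) (fun c => (c == "?"))
    simp only [h1, hnq]
    omega
  have hcard_le : nonq.toFinset.card ≤ nonq.length := nonq.toFinset_card_le
  have hlen : t.length = min 26 (s.length - i) := pvWin_length s i
  have hval : pvValid s i = true ↔ (i + 26 ≤ s.length ∧ nonq.Nodup) := by
    simp [pvValid, ← ht, ← hnq]
  rw [hS, hq, hval, pvNodup_iff_card]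
  omega

-- A's difference list, in C's order, is pvMissing
theorem diff_eq_missing (s : List String) (i : Nat) :
    PySem.Set.diff (PySem.Set.ofList pyUppercase)
      (PySem.Set.add (PySem.Set.ofList (pvWin s i)) "?") = pvMissing s i := by
  have hof : PySem.Set.ofList pyUppercase = pyUppercase := rfl
  show (PySem.Set.ofList pyUppercase).filter _ = _
  rw [hof, pvMissing]
  apply List.filter_congr
  intro u hu
  have hVne : ∀ v ∈ pyUppercase, v ≠ "?" := by decide
  have hne : u ≠ "?" := hVne u hu
  have hmem : u ∈ PySem.Set.add (PySem.Set.ofList (pvWin s i)) "?" ↔ u ∈ pvWin s i := by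
    simp [PySem.Set.mem_add, PySem.Set.mem_ofList, hne]
  simp [List.contains_eq_mem, hmem]

-- the two fill loops are the same computation
theorem fFill_eq (fuel j : Nat) (s x : List String) :
    fFillA j fuel s x = fFillB j fuel s x := by
  induction fuel generalizing j s x with
  | zero => rfl
  | succ n ih =>
    unfold fFillA fFillB
    split
    · cases h : PySem.List.pop? x (-1) with
      | none => exact ih _ _ _
      | some r => exact ih _ _ _
    · exact ih _ _ _

theorem pvOut_eq (s : List String) (i : Nat) : pvOutA s i = pvOutB s i := by
  simp [pvOutA, pvOutB, fFill_eq]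

-- bridge: window validity in index form
theorem pvValid_iff_noDupIdx (s : List String) (i : Nat) (h : i + 26 ≤ s.length) :
    pvValid s i = true ↔ noDupIdx s i (i + 26) := by
  have hlen : (pvWin s i).length = 26 := by have := pvWin_length s i; omega
  have hval : pvValid s i = true ↔ ((pvWin s i).filter (fun c => !(c == "?"))).Nodup := by
    simp [pvValid, h]
  rw [hval]
  unfold List.Nodup
  rw [List.pairwise_filter, List.pairwise_iff_getElem]
  constructor
  · intro hp k1 k2 hk1 hlt hk2 hq
    have ha : k1 - i < (pvWin s i).length := by omega
    have hb : k2 - i < (pvWin s i).length := by omega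
    have hab : k1 - i < k2 - i := by omega
    have hthis := hp (k1-i) (k2-i) ha hb hab
    rw [pvWin_getElem s i (k1-i) ha, pvWin_getElem s i (k2-i) hb] at hthis
    have e1 : i + (k1 - i) = k1 := by omega
    have e2 : i + (k2 - i) = k2 := by omega
    rw [e1, e2] at hthis
    by_cases hq2 : s.getD k2 "" = "?"
    · intro he; exact hq (he.trans hq2)
    · exact hthis (by simpa using hq) (by simpa using hq2)
  · intro hnd a b ha hb hab pa pb
    rw [pvWin_getElem s i a ha] at pa
    rw [pvWin_getElem s i a ha, pvWin_getElem s i b hb]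
    exact hnd (i+a) (i+b) (by omega) (by omega) (by omega) (by simpa using pa)

theorem pvValid_le (s : List String) (i : Nat) (h : pvValid s i = true) :
    i + 26 ≤ s.length := by
  unfold pvValid at h
  simp only [Bool.and_eq_true, decide_eq_true_eq] at h
  exact h.1

-- ---------- A's loop ----------


theorem loopA_step (s : List String) (i fuel : Nat) :
    fLoopA s i (fuel + 1) = if pvValid s i = true then pvOutA s i else fLoopA s (i+1) fuel := by
  show (let t := PySem.List.slice s (some (i : Int)) (some ((i : Int) + 26));
        let X := PySem.Set.add (PySem.Set.ofList t) "?";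
        if X.length + PySem.List.count t "?" == 27 then
          let x := PySem.Set.diff (PySem.Set.ofList pyUppercase) X
          PySem.Str.replace (PySem.Str.join "" (fFillA i 26 s x)) "?" "A"
        else fLoopA s (i+1) fuel) = _
  simp only [pvSlice_eq_win]
  have hc : ((PySem.Set.add (PySem.Set.ofList (pvWin s i)) "?").length
      + PySem.List.count (pvWin s i) "?" == 27) = pvValid s i := by
    rw [Bool.eq_iff_iff]
    simp only [beq_iff_eq]
    rw [condA_iff]
  rw [hc]
  by_cases hv : pvValid s i = true
  · simp only [hv, if_true]
    rw [diff_eq_missing]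
    rfl
  · simp only [Bool.not_eq_true] at hv
    simp [hv]

theorem loopA_found (s : List String) (fuel : Nat) :
    ∀ i i₀, i ≤ i₀ → i₀ < i + fuel → pvValid s i₀ = true →
      (∀ k, i ≤ k → k < i₀ → pvValid s k = false) →
      fLoopA s i fuel = pvOutA s i₀ := by
  induction fuel with
  | zero => intro i i₀ h1 h2 _ _; omega
  | succ n ih =>
    intro i i₀ h1 h2 hv hmin
    rw [loopA_step]
    by_cases he : i = i₀
    · subst he; simp [hv]
    · have hf : pvValid s i = false := hmin i le_rfl (by omega)
      rw [hf]
      simp only [Bool.false_eq_true, if_false]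
      exact ih (i+1) i₀ (by omega) (by omega) hv (fun k hk1 hk2 => hmin k (by omega) hk2)

theorem loopA_none (s : List String) (fuel : Nat) :
    ∀ i, (∀ k, i ≤ k → k < i + fuel → pvValid s k = false) →
      fLoopA s i fuel = "-1" := by
  induction fuel with
  | zero => intro i _; rfl
  | succ n ih =>
    intro i hall
    rw [loopA_step, hall i le_rfl (by omega)]
    simp only [Bool.false_eq_true, if_false]
    exact ih (i+1) (fun k hk1 hk2 => hall k (by omega) (by omega))

theorem f_found (s : List String) (i₀ : Nat) (hv : pvValid s i₀ = true)
    (hmin : ∀ k, k < i₀ → pvValid s k = false) : f s = pvOutA s i₀ := by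
  have hlt : i₀ < s.length := by have := pvValid_le s i₀ hv; omega
  exact loopA_found s s.length 0 i₀ (by omega) (by omega) hv (fun k _ hk => hmin k hk)

theorem f_none (s : List String) (hno : ∀ i, pvValid s i = false) : f s = "-1" := by
  exact loopA_none s s.length 0 (fun k _ _ => hno k)

-- ---------- B's loop ----------


-- ---------- two-pointer invariant machinery ----------

theorem noDupIdx_top (s : List String) (l j : Nat) (h : j ≤ l) : noDupIdx s l j := by
  intro k1 k2 h1 h2 h3
  omega

theorem noDupIdx_succ_iff (s : List String) (l j : Nat) :
    noDupIdx s l (j+1) ↔ (noDupIdx s l j ∧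
      ∀ k, l ≤ k → k < j → s.getD k "" ≠ "?" → s.getD k "" ≠ s.getD j "") := by
  constructor
  · intro h
    exact ⟨fun k1 k2 h1 h2 h3 => h k1 k2 h1 h2 (by omega),
           fun k hk1 hk2 => h k j hk1 hk2 (by omega)⟩
  · rintro ⟨h1, h2⟩ k1 k2 hk1 hk2 hk3 hq
    by_cases hj : k2 = j
    · subst hj; exact h2 k1 hk1 hk2 hq
    · exact h1 k1 k2 hk1 hk2 (by omega) hq

-- when s[j] ≠ '?', the new pairs say: no occurrence of s[j] in [l, j)
theorem noDupIdx_succ_iff_ne (s : List String) (l j : Nat) (hc : s.getD j "" ≠ "?") :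
    noDupIdx s l (j+1) ↔ (noDupIdx s l j ∧ ∀ k, l ≤ k → k < j → s.getD k "" ≠ s.getD j "") := by
  rw [noDupIdx_succ_iff]
  refine and_congr_right fun _ => ⟨fun h k hk1 hk2 => ?_, fun h k hk1 hk2 _ => h k hk1 hk2⟩
  by_cases hq : s.getD k "" = "?"
  · rw [hq]; exact fun he => hc he.symm
  · exact h k hk1 hk2 hq

-- when s[j] = '?', nothing new is constrained
theorem noDupIdx_succ_iff_eq (s : List String) (l j : Nat) (hc : s.getD j "" = "?") :
    noDupIdx s l (j+1) ↔ noDupIdx s l j := by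
  rw [noDupIdx_succ_iff]
  exact ⟨fun h => h.1, fun h => ⟨h, fun k _ _ hq he => hq (he.trans hc)⟩⟩

theorem invPrev_step_eq (s : List String) (j : Nat) (prev : PySem.Dict String Int)
    (hp : InvPrev s j prev) (hc : s.getD j "" = "?") : InvPrev s (j+1) prev := by
  intro c hcq
  rcases hp c hcq with ⟨hg, hnone⟩ | ⟨p, hg, hpj, hocc, hlast⟩
  · exact Or.inl ⟨hg, fun k hk => by
      by_cases hkj : k = j
      · subst hkj; rw [hc]; exact fun he => hcq he.symm
      · exact hnone k (by omega)⟩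
  · exact Or.inr ⟨p, hg, by omega, hocc, fun k hk1 hk2 => by
      by_cases hkj : k = j
      · subst hkj; rw [hc]; exact fun he => hcq he.symm
      · exact hlast k hk1 (by omega)⟩

theorem invPrev_step_ne (s : List String) (j : Nat) (prev : PySem.Dict String Int)
    (hp : InvPrev s j prev) (hc : s.getD j "" ≠ "?") :
    InvPrev s (j+1) (PySem.Dict.insert prev (s.getD j "") (j : Int)) := by
  intro c hcq
  by_cases hcc : c = s.getD j ""
  · subst hcc
    exact Or.inr ⟨j, PySem.Dict.get?_insert_self prev _ _, by omega, rfl,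
      fun k hk1 hk2 => by omega⟩
  · have hg : (PySem.Dict.insert prev (s.getD j "") (j : Int)).get? c = prev.get? c :=
      PySem.Dict.get?_insert_of_ne prev (j : Int) hcc
    rcases hp c hcq with ⟨hg0, hnone⟩ | ⟨p, hg0, hpj, hocc, hlast⟩
    · exact Or.inl ⟨hg.trans hg0, fun k hk => by
        by_cases hkj : k = j
        · subst hkj; exact fun he => hcc (he.symm ▸ rfl)
        · exact hnone k (by omega)⟩
    · exact Or.inr ⟨p, hg.trans hg0, by omega, hocc, fun k hk1 hk2 => by
        by_cases hkj : k = j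
        · subst hkj; exact fun he => hcc (he.symm ▸ rfl)
        · exact hlast k hk1 (by omega)⟩

theorem invLeft_step_eq (s : List String) (j : Nat) (left : Int)
    (hl : InvLeft s j left) (hc : s.getD j "" = "?") : InvLeft s (j+1) left := by
  obtain ⟨h0, hj, hiff⟩ := hl
  refine ⟨h0, by push_cast; omega, fun l hlj => ?_⟩
  by_cases hl' : l ≤ j
  · rw [noDupIdx_succ_iff_eq s l j hc]; exact hiff l hl'
  · have hl1 : l = j + 1 := by omega
    subst hl1
    simp only [iff_true_intro (noDupIdx_top s (j+1) (j+1) le_rfl), true_iff]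
    push_cast; omega

theorem invLeft_step_ne (s : List String) (j : Nat) (prev : PySem.Dict String Int) (left : Int)
    (hp : InvPrev s j prev) (hl : InvLeft s j left) (hc : s.getD j "" ≠ "?") :
    InvLeft s (j+1)
      (if ((PySem.Dict.get? prev (s.getD j "")).getD (-1)) ≥ left then
        ((PySem.Dict.get? prev (s.getD j "")).getD (-1)) + 1 else left) := by
  obtain ⟨h0, hj, hiff⟩ := hl
  rcases hp (s.getD j "") hc with ⟨hg, hnone⟩ | ⟨p, hg, hpj, hocc, hlast⟩
  · rw [hg]
    have : ¬ ((-1 : Int) ≥ left) := by omega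
    rw [if_neg (by simpa using this)]
    refine ⟨h0, by push_cast; omega, fun l hlj => ?_⟩
    by_cases hl' : l ≤ j
    · rw [noDupIdx_succ_iff_ne s l j hc]
      rw [hiff l hl']
      constructor
      · exact fun h => h.1
      · exact fun h => ⟨h, fun k _ hk2 => hnone k hk2⟩
    · have hl1 : l = j + 1 := by omega
      subst hl1
      simp only [iff_true_intro (noDupIdx_top s (j+1) (j+1) le_rfl), true_iff]
      push_cast; omega
  · rw [hg]
    simp only [Option.getD_some]
    -- occurrences of s[j] in [l, j) exist exactly when l ≤ p
    have hkey : ∀ l : Nat, l ≤ j →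
        ((∀ k, l ≤ k → k < j → s.getD k "" ≠ s.getD j "") ↔ (p : Int) < (l : Int)) := by
      intro l hlj
      constructor
      · intro h
        by_contra hpl
        exact h p (by omega) hpj hocc
      · intro hpl k hk1 hk2
        exact hlast k (by omega) hk2
    by_cases hge : (p : Int) ≥ left
    · rw [if_pos hge]
      refine ⟨by omega, by push_cast; omega, fun l hlj => ?_⟩
      by_cases hl' : l ≤ j
      · rw [noDupIdx_succ_iff_ne s l j hc, hiff l hl', hkey l hl']
        omega
      · have hl1 : l = j + 1 := by omega
        subst hl1
        simp only [iff_true_intro (noDupIdx_top s (j+1) (j+1) le_rfl), true_iff]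
        push_cast; omega
    · rw [if_neg hge]
      refine ⟨h0, by push_cast; omega, fun l hlj => ?_⟩
      by_cases hl' : l ≤ j
      · rw [noDupIdx_succ_iff_ne s l j hc, hiff l hl', hkey l hl']
        omega
      · have hl1 : l = j + 1 := by omega
        subst hl1
        simp only [iff_true_intro (noDupIdx_top s (j+1) (j+1) le_rfl), true_iff]
        push_cast; omega

-- the window check after the update: trigger exactly when start j-25 is valid
theorem trigger_iff (s : List String) (j : Nat) (left' : Int) (hjlen : j < s.length)
    (hL : InvLeft s (j+1) left') :
    (25 ≤ (j : Int) - left') ↔ (25 ≤ j ∧ pvValid s (j - 25) = true) := by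
  obtain ⟨h0, hj1, hiff⟩ := hL
  constructor
  · intro htr
    have hj25 : 25 ≤ j := by omega
    refine ⟨hj25, ?_⟩
    have hlen : (j - 25) + 26 ≤ s.length := by omega
    rw [pvValid_iff_noDupIdx s (j-25) hlen]
    have he : (j - 25) + 26 = j + 1 := by omega
    rw [he]
    rw [hiff (j-25) (by omega)]
    omega
  · rintro ⟨hj25, hv⟩
    have hlen : (j - 25) + 26 ≤ s.length := pvValid_le s (j-25) hv
    rw [pvValid_iff_noDupIdx s (j-25) hlen] at hv
    have he : (j - 25) + 26 = j + 1 := by omega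
    rw [he] at hv
    rw [hiff (j-25) (by omega)] at hv
    omega

theorem loopB_found (s : List String) (i₀ : Nat) (hv : pvValid s i₀ = true)
    (hmin : ∀ k, k < i₀ → pvValid s k = false) :
    ∀ rest, ∀ j : Nat, ∀ prev left, rest = s.drop j →
      InvPrev s j prev → InvLeft s j left →
      (∀ i : Nat, i + 26 ≤ j → pvValid s i = false) →
      fLoopB s rest prev left (j : Int) = pvOutB s i₀ := by
  intro rest
  induction rest with
  | nil =>
    intro j prev left hrest hP hL hext
    have hlen : s.length ≤ j := List.drop_eq_nil_iff.mp hrest.symm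
    have h26 := pvValid_le s i₀ hv
    rw [hext i₀ (by omega)] at hv
    cases hv
  | cons c rest' ih =>
    intro j prev left hrest hP hL hext
    have hjlen : j < s.length := by
      by_contra h
      rw [List.drop_eq_nil_of_le (by omega)] at hrest
      simp at hrest
    have hdrop : c :: rest' = s[j] :: s.drop (j+1) :=
      hrest.trans (List.drop_eq_getElem_cons hjlen)
    have hcj : c = s[j] := by injection hdrop
    have hrest' : rest' = s.drop (j+1) := by injection hdrop
    have hgd : s.getD j "" = c := by rw [List.getD_eq_getElem s "" hjlen, hcj]
    by_cases hcq : c = "?"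
    · -- '?': prev and left are unchanged
      have hbne : (c != "?") = false := by simp [hcq]
      have hP' : InvPrev s (j+1) prev := invPrev_step_eq s j prev hP (hgd.trans hcq)
      have hL' : InvLeft s (j+1) left := invLeft_step_eq s j left hL (hgd.trans hcq)
      rw [show fLoopB s (c :: rest') prev left (j : Int)
          = (if (j : Int) - left ≥ 25 then
              PySem.Str.replace (PySem.Str.join "" (fFillB ((j : Int) - 25).toNat 26 s
                (pyUppercase.filter (fun u => !((PySem.List.slice s (some ((j : Int) - 25))
                  (some ((j : Int) + 1))).contains u)))) ) "?" "A"
            else fLoopB s rest' prev left ((j : Int) + 1)) by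
        simp only [fLoopB, hbne, Bool.false_eq_true, if_false]]
      by_cases htr : (j : Int) - left ≥ 25
      · rw [if_pos htr]
        obtain ⟨hj25, hvj⟩ := (trigger_iff s j left hjlen hL').mp htr
        have hi : i₀ = j - 25 := by
          have h1 : ¬ (j - 25 < i₀) := fun h => by rw [hmin _ h] at hvj; cases hvj
          have h2 : ¬ (i₀ + 26 ≤ j) := fun h => by rw [hext i₀ h] at hv; cases hv
          have h26 := pvValid_le s i₀ hv
          omega
        have e1 : ((j : Int) - 25) = ((j - 25 : Nat) : Int) := by omega
        have e2 : ((j : Int) + 1) = ((j - 25 : Nat) : Int) + 26 := by omega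
        have e3 : ((j : Int) - 25).toNat = j - 25 := by omega
        rw [e3, e1, e2, pvSlice_eq_win, hi]
        rfl
      · rw [if_neg htr]
        have hext' : ∀ i : Nat, i + 26 ≤ j + 1 → pvValid s i = false := by
          intro i' h'
          by_cases h'' : i' + 26 ≤ j
          · exact hext i' h''
          · cases hbv : pvValid s i' with
            | false => rfl
            | true =>
              have : i' = j - 25 ∧ 25 ≤ j := by omega
              exact absurd ((trigger_iff s j left hjlen hL').mpr
                ⟨this.2, by rw [show j - 25 = i' by omega]; exact hbv⟩) htr
        have ecast : ((j + 1 : Nat) : Int) = (j : Int) + 1 := by push_cast; ring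
        rw [← ecast]
        exact ih (j+1) prev left hrest' hP' hL' hext'
    · -- a real value: update prev and left
      have hbne : (c != "?") = true := by simp [hcq]
      have hP' : InvPrev s (j+1) (PySem.Dict.insert prev c (j : Int)) := by
        have := invPrev_step_ne s j prev hP (by rw [hgd]; exact hcq)
        rwa [hgd] at this
      have hL' : InvLeft s (j+1)
          (if ((PySem.Dict.get? prev c).getD (-1)) ≥ left then
            ((PySem.Dict.get? prev c).getD (-1)) + 1 else left) := by
        have := invLeft_step_ne s j prev left hP hL (by rw [hgd]; exact hcq)
        rwa [hgd] at this
      set p := (PySem.Dict.get? prev c).getD (-1) with hp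
      set left' := if p ≥ left then p + 1 else left with hleft'
      set prev' := PySem.Dict.insert prev c (j : Int) with hprev'
      rw [show fLoopB s (c :: rest') prev left (j : Int)
          = (if (j : Int) - left' ≥ 25 then
              PySem.Str.replace (PySem.Str.join "" (fFillB ((j : Int) - 25).toNat 26 s
                (pyUppercase.filter (fun u => !((PySem.List.slice s (some ((j : Int) - 25))
                  (some ((j : Int) + 1))).contains u)))) ) "?" "A"
            else fLoopB s rest' prev' left' ((j : Int) + 1)) by
        simp only [fLoopB, hbne, if_true]
        rfl]
      by_cases htr : (j : Int) - left' ≥ 25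
      · rw [if_pos htr]
        obtain ⟨hj25, hvj⟩ := (trigger_iff s j left' hjlen hL').mp htr
        have hi : i₀ = j - 25 := by
          have h1 : ¬ (j - 25 < i₀) := fun h => by rw [hmin _ h] at hvj; cases hvj
          have h2 : ¬ (i₀ + 26 ≤ j) := fun h => by rw [hext i₀ h] at hv; cases hv
          have h26 := pvValid_le s i₀ hv
          omega
        have e1 : ((j : Int) - 25) = ((j - 25 : Nat) : Int) := by omega
        have e2 : ((j : Int) + 1) = ((j - 25 : Nat) : Int) + 26 := by omega
        have e3 : ((j : Int) - 25).toNat = j - 25 := by omega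
        rw [e3, e1, e2, pvSlice_eq_win, hi]
        rfl
      · rw [if_neg htr]
        have hext' : ∀ i : Nat, i + 26 ≤ j + 1 → pvValid s i = false := by
          intro i' h'
          by_cases h'' : i' + 26 ≤ j
          · exact hext i' h''
          · cases hbv : pvValid s i' with
            | false => rfl
            | true =>
              have : i' = j - 25 ∧ 25 ≤ j := by omega
              exact absurd ((trigger_iff s j left' hjlen hL').mpr
                ⟨this.2, by rw [show j - 25 = i' by omega]; exact hbv⟩) htr
        have ecast : ((j + 1 : Nat) : Int) = (j : Int) + 1 := by push_cast; ring
        rw [← ecast]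
        exact ih (j+1) prev' left' hrest' hP' hL' hext' 

theorem loopB_none (s : List String) (hno : ∀ i, pvValid s i = false) :
    ∀ rest, ∀ j : Nat, ∀ prev left, rest = s.drop j →
      InvPrev s j prev → InvLeft s j left →
      fLoopB s rest prev left (j : Int) = "-1" := by
  intro rest
  induction rest with
  | nil => intro j prev left _ _ _; rfl
  | cons c rest' ih =>
    intro j prev left hrest hP hL
    have hjlen : j < s.length := by
      by_contra h
      rw [List.drop_eq_nil_of_le (by omega)] at hrest
      simp at hrest
    have hdrop : c :: rest' = s[j] :: s.drop (j+1) :=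
      hrest.trans (List.drop_eq_getElem_cons hjlen)
    have hcj : c = s[j] := by injection hdrop
    have hrest' : rest' = s.drop (j+1) := by injection hdrop
    have hgd : s.getD j "" = c := by rw [List.getD_eq_getElem s "" hjlen, hcj]
    have ecast : ((j + 1 : Nat) : Int) = (j : Int) + 1 := by push_cast; ring
    by_cases hcq : c = "?"
    · have hbne : (c != "?") = false := by simp [hcq]
      have hP' : InvPrev s (j+1) prev := invPrev_step_eq s j prev hP (hgd.trans hcq)
      have hL' : InvLeft s (j+1) left := invLeft_step_eq s j left hL (hgd.trans hcq)
      have htr : ¬ ((j : Int) - left ≥ 25) := by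
        intro htr
        have := ((trigger_iff s j left hjlen hL').mp htr).2
        rw [hno (j - 25)] at this
        cases this
      rw [show fLoopB s (c :: rest') prev left (j : Int)
          = fLoopB s rest' prev left ((j : Int) + 1) by
        simp only [fLoopB, hbne, Bool.false_eq_true, if_false, if_neg htr]]
      rw [← ecast]
      exact ih (j+1) prev left hrest' hP' hL'
    · have hbne : (c != "?") = true := by simp [hcq]
      have hP' : InvPrev s (j+1) (PySem.Dict.insert prev c (j : Int)) := by
        have := invPrev_step_ne s j prev hP (by rw [hgd]; exact hcq)
        rwa [hgd] at this
      have hL' : InvLeft s (j+1)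
          (if ((PySem.Dict.get? prev c).getD (-1)) ≥ left then
            ((PySem.Dict.get? prev c).getD (-1)) + 1 else left) := by
        have := invLeft_step_ne s j prev left hP hL (by rw [hgd]; exact hcq)
        rwa [hgd] at this
      set left' := if ((PySem.Dict.get? prev c).getD (-1)) ≥ left then
          ((PySem.Dict.get? prev c).getD (-1)) + 1 else left with hleft'
      have htr : ¬ ((j : Int) - left' ≥ 25) := by
        intro htr
        have := ((trigger_iff s j left' hjlen hL').mp htr).2
        rw [hno (j - 25)] at this
        cases this
      rw [show fLoopB s (c :: rest') prev left (j : Int)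
          = fLoopB s rest' (PySem.Dict.insert prev c (j : Int)) left' ((j : Int) + 1) by
        simp only [fLoopB, hbne, if_true]
        rw [if_neg htr]]
      rw [← ecast]
      exact ih (j+1) _ left' hrest' hP' hL' 

theorem invPrev_zero (s : List String) : InvPrev s 0 PySem.Dict.empty := by
  intro c _
  exact Or.inl ⟨by simp [PySem.Dict.get?_empty], fun k hk => by omega⟩

theorem invLeft_zero (s : List String) : InvLeft s 0 0 := by
  refine ⟨le_rfl, by simp, fun l hl => ?_⟩
  have hl0 : l = 0 := by omega
  subst hl0
  simp only [iff_true_intro (noDupIdx_top s 0 0 le_rfl), true_iff]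
  simp

-- The two ports are in fact equal on EVERY input (both are deterministic; Pre_f is needed only
-- for faithfulness to Python A, whose set order the port cannot model outside Pre_f).
theorem f_eq_f_alt (s : List String) : f s = f_alt s := by
  by_cases hex : ∃ i, pvValid s i = true
  · have i₀ := Nat.find hex
    have hv := Nat.find_spec hex
    have hmin : ∀ k, k < Nat.find hex → pvValid s k = false := by
      intro k hk
      have := Nat.find_min hex hk
      simpa using this
    rw [f_found s _ hv hmin]
    have hb : f_alt s = pvOutB s (Nat.find hex) :=
      loopB_found s _ hv hmin s 0 PySem.Dict.empty 0 rfl (invPrev_zero s) (invLeft_zero s)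
        (by intro i hi; omega)
    rw [hb]
    exact pvOut_eq s _
  · have hno : ∀ i, pvValid s i = false := by
      intro i; simpa using (not_exists.mp hex) i
    rw [f_none s hno]
    exact (loopB_none s hno s 0 PySem.Dict.empty 0 rfl (invPrev_zero s) (invLeft_zero s)).symm

-- ===== VERDICT (by name: the statement is the Claim_ definition above) =====
theorem f_spec : Claim_equal_f := by
  intro s _ _
  unfold Spec_f
  exact f_eq_f_alt s
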